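-- pv_equiv track=rewrite | github.com/4lxndr3/dogo_problem | funcoes.py | calcular_distancia_obstaculo
-- ===== SOURCE A (Python) =====
-- def calcular_distancia_obstaculo(cachorro_x, cachorro_y, obstaculos):
--     for y in range(len(obstaculos)):
--         for x in range(len(obstaculos[0])):
--             if obstaculos[y][x]:
--                 distancia_x = abs(cachorro_x - x)
--                 distancia_y = abs(cachorro_y - y)
--                 if distancia_x <= 1 and distancia_y <= 1:
--                     return True
--     return False
-- ===== SOURCE B (Python) =====
-- def calcular_distancia_obstaculo(cachorro_x, cachorro_y, obstaculos):
--     altura = len(obstaculos)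
--     largura = len(obstaculos[0]) if obstaculos else 0
--     for y in range(max(0, cachorro_y - 1), min(altura, cachorro_y + 2)):
--         for x in range(max(0, cachorro_x - 1), min(largura, cachorro_x + 2)):
--             if obstaculos[y][x]:
--                 return True
--     return False
-- ===== Notes on version B (the rewrite author's own statement) =====
-- stated objective: faster
-- what changed: B scans only the at-most-3x3 clipped neighborhood of the dog instead of the whole grid, so cells outside the window are never touched.
-- outside the precondition, e.g. on calcular_distancia_obstaculo(0, 0, [[True], []]): A returns True, B returns True
import Mathlib
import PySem

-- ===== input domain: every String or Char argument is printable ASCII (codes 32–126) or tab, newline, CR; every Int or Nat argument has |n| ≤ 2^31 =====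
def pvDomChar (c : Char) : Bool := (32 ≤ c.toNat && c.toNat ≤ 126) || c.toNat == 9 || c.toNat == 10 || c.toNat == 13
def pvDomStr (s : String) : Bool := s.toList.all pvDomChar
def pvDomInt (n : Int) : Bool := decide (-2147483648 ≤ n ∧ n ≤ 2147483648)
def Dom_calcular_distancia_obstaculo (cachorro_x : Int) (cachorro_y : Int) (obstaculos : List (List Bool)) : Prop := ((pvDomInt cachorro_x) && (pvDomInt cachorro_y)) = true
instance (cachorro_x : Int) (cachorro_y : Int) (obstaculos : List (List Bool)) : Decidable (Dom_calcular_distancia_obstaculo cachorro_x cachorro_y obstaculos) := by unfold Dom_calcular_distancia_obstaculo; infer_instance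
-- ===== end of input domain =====

-- B checks only the clipped 3x3 neighborhood of the dog instead of scanning the whole grid (faster).


-- ===== PORT A =====
-- Full row-major scan; first obstacle within Chebyshev distance 1 returns True (the .any is the early return).
def calcular_distancia_obstaculo (cachorro_x : Int) (cachorro_y : Int) (obstaculos : List (List Bool)) : Bool :=
  (List.range obstaculos.length).any (fun y =>
    (List.range (obstaculos.headD []).length).any (fun x =>
      if (obstaculos.getD y []).getD x false then
        let distancia_x := (cachorro_x - (x : Int)).natAbs
        let distancia_y := (cachorro_y - (y : Int)).natAbs
        decide (distancia_x ≤ 1 ∧ distancia_y ≤ 1)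
      else false))

-- ===== PORT B =====
-- Scan only the clipped 3x3 window around the dog.
def calcular_distancia_obstaculo_alt (cachorro_x : Int) (cachorro_y : Int) (obstaculos : List (List Bool)) : Bool :=
  let altura : Int := obstaculos.length
  let largura : Int := if obstaculos = [] then 0 else ((obstaculos.headD []).length : Int)
  (PySem.List.pyRange (max 0 (cachorro_y - 1)) (min altura (cachorro_y + 2)) 1).any (fun y =>
    (PySem.List.pyRange (max 0 (cachorro_x - 1)) (min largura (cachorro_x + 2)) 1).any (fun x =>
      PySem.List.pyGetD (PySem.List.pyGetD obstaculos y []) x false))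

-- ===== PRECONDITION & SPEC =====
-- Pre_ excludes the ragged grids with a row shorter than row 0, on which Python A raises IndexError
-- (on a few such grids A still returns True before reaching the short row; those are excluded too,
-- and B returns the same True there).
def Pre_calcular_distancia_obstaculo (cachorro_x : Int) (cachorro_y : Int) (obstaculos : List (List Bool)) : Prop :=
  ∀ row ∈ obstaculos, (obstaculos.headD []).length ≤ row.length
instance (cachorro_x : Int) (cachorro_y : Int) (obstaculos : List (List Bool)) : Decidable (Pre_calcular_distancia_obstaculo cachorro_x cachorro_y obstaculos) := by unfold Pre_calcular_distancia_obstaculo; infer_instance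

def pvWitness_calcular_distancia_obstaculo : Int × Int × List (List Bool) := (0, 1, [[false, true], [false, false]])

def Spec_calcular_distancia_obstaculo (cachorro_x : Int) (cachorro_y : Int) (obstaculos : List (List Bool)) (out : Bool) : Prop := out = calcular_distancia_obstaculo_alt cachorro_x cachorro_y obstaculos
instance (cachorro_x : Int) (cachorro_y : Int) (obstaculos : List (List Bool)) (out : Bool) : Decidable (Spec_calcular_distancia_obstaculo cachorro_x cachorro_y obstaculos out) := by unfold Spec_calcular_distancia_obstaculo; infer_instance

-- ===== CLAIM (what is proved, stated in full; the proofs are below) =====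
def Claim_equal_calcular_distancia_obstaculo : Prop := ∀ (cachorro_x : Int) (cachorro_y : Int) (obstaculos : List (List Bool)), Dom_calcular_distancia_obstaculo cachorro_x cachorro_y obstaculos → Pre_calcular_distancia_obstaculo cachorro_x cachorro_y obstaculos → Spec_calcular_distancia_obstaculo cachorro_x cachorro_y obstaculos (calcular_distancia_obstaculo cachorro_x cachorro_y obstaculos)

-- ===== LEMMAS AND PROOFS =====

-- ===== VERDICT (by name: the statement is the Claim_ definition above) =====
theorem calcular_distancia_obstaculo_spec : Claim_equal_calcular_distancia_obstaculo := by
  intro cx cy obst _ _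
  unfold Spec_calcular_distancia_obstaculo
  have hW : (if obst = [] then (0 : Int) else ((obst.headD []).length : Int))
      = ((obst.headD []).length : Int) := by cases obst <;> simp
  rw [Bool.eq_iff_iff]
  simp only [calcular_distancia_obstaculo, calcular_distancia_obstaculo_alt,
    List.any_eq_true, List.mem_range, PySem.List.mem_pyRange_one,
    Bool.and_eq_true, decide_eq_true_eq, Bool.if_false_right, max_le_iff, lt_min_iff, hW]
  constructor
  · rintro ⟨y, hy, x, hx, hobs, hdx, hdy⟩
    refine ⟨(y : Int), ⟨⟨?_, ?_⟩, ?_, ?_⟩, (x : Int), ⟨⟨?_, ?_⟩, ?_, ?_⟩, ?_⟩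
    all_goals first
      | omega
      | (simp only [PySem.List.pyGetD_natCast]; exact hobs)
  · rintro ⟨y, ⟨⟨hy0, hy1⟩, hyH, hy2⟩, x, ⟨⟨hx0, hx1⟩, hxW, hx2⟩, hobs⟩
    rw [show y = ((y.toNat : Nat) : Int) by omega, show x = ((x.toNat : Nat) : Int) by omega] at hobs
    simp only [PySem.List.pyGetD_natCast] at hobs
    exact ⟨y.toNat, by omega, x.toNat, by omega, hobs, by omega, by omega⟩
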